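-- pv_equiv track=rewrite | github.com/mt4110/maakie-brainlab | src/il_compile.py | _repair_missing_closing_braces
-- ===== SOURCE A (Python) =====
-- from typing import Any, Callable, Dict, List, Optional, Tuple
--
-- _MAX_REPAIR_CLOSE_DEPTH = 6
--
-- def _repair_missing_closing_braces(text: str) -> Optional[str]:
--     # Intentionally only repairs unmatched "}" depth.
--     # Unclosed arrays/brackets are left fail-closed to keep repair scope narrow.
--     depth = 0
--     in_string = False
--     escape = False
--     for ch in text:
--         if in_string:
--             if escape:
--                 escape = False
--             elif ch == "\\":
--                 escape = True
--             elif ch == '"':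
--                 in_string = False
--             continue
--         if ch == '"':
--             in_string = True
--             continue
--         if ch == "{":
--             depth += 1
--         elif ch == "}":
--             depth -= 1
--             if depth < 0:
--                 return None
--     if in_string:
--         return None
--     if depth <= 0 or depth > _MAX_REPAIR_CLOSE_DEPTH:
--         return None
--     return text + ("}" * depth)
-- ===== SOURCE B (Python) =====
-- # Two-stage reimplementation: first strip all complete string literals,
-- # then count brace depth on the cleaned text (a leftover '"' means an
-- # unterminated string).
--
-- _MAX_REPAIR_CLOSE_DEPTH = 6
--
--
-- def _match_literal(text, i):
--     # Scan a string literal body starting at index i (just after the opening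
--     # quote); return the index just past the closing quote, or None.
--     n = len(text)
--     while i < n:
--         c = text[i]
--         if c == '"':
--             return i + 1
--         if c == '\\':
--             i += 2
--         else:
--             i += 1
--     return None
--
--
-- def _strip_string_literals(text):
--     out = []
--     i = 0
--     n = len(text)
--     while i < n:
--         c = text[i]
--         if c != '"':
--             out.append(c)
--             i += 1
--             continue
--         j = _match_literal(text, i + 1)
--         if j is None:
--             out.append(c)
--             i += 1
--         else:
--             i = j
--     return "".join(out)
--
--
-- def _repair_missing_closing_braces(text):
--     cleaned = _strip_string_literals(text)
--     if '"' in cleaned: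
--         return None
--     depth = 0
--     for ch in cleaned:
--         if ch == "{":
--             depth += 1
--         elif ch == "}":
--             depth -= 1
--             if depth < 0:
--                 return None
--     if depth <= 0 or depth > _MAX_REPAIR_CLOSE_DEPTH:
--         return None
--     return text + "}" * depth
-- ===== Notes on version B (the rewrite author's own statement) =====
-- stated objective: alternative
-- what changed: Replaces the fused char-by-char state machine (depth/in_string/escape flags in one loop) with a two-stage pipeline: first strip every complete string literal from the text (a leftover quote signals an unterminated string), then count brace depth on the cleaned text with a flag-free loop.
import Mathlib
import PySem

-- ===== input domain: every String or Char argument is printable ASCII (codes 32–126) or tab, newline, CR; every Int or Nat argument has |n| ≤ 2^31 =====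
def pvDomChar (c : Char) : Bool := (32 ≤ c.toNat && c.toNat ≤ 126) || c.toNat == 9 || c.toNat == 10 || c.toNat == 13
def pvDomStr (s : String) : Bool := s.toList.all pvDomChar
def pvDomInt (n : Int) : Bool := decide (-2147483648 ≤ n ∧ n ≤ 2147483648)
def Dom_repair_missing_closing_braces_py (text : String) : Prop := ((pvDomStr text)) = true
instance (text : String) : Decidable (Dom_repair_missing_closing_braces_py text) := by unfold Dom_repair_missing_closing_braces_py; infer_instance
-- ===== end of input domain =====

-- B replaces A's fused depth/in_string/escape state machine with a two-stage
-- pipeline (strip complete string literals, then count braces); same cost, no flags.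

-- ===== PORT A =====
-- the for-loop with state (depth, in_string, escape); 'return None' inside the loop = none
def aScan : List Char → Int → Bool → Bool → Option (Int × Bool)
  | [], d, s, _ => some (d, s)
  | ch :: cs, d, s, e =>
    if s then
      if e then aScan cs d s false
      else if ch = '\\' then aScan cs d s true
      else if ch = '"' then aScan cs d false e
      else aScan cs d s e
    else if ch = '"' then aScan cs d true e
    else if ch = '{' then aScan cs (d + 1) s e
    else if ch = '}' then
      if d - 1 < 0 then none else aScan cs (d - 1) s e
    else aScan cs d s e

def repair_missing_closing_braces_py (text : String) : Option String :=
  match aScan text.toList 0 false false with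
  | none => none
  | some (d, instr) =>
    if instr then none
    else if d ≤ 0 ∨ 6 < d then none
    else some (text ++ String.mk (List.replicate d.toNat '}'))

-- ===== PORT B =====
-- _match_literal: scan a literal body; index arithmetic becomes list recursion (exact:
-- i+2 past the end, i.e. a trailing backslash, is the '\\' :: [] case returning none)
def matchLit : List Char → Option (List Char)
  | [] => none
  | '"' :: rest => some rest
  | '\\' :: [] => none
  | '\\' :: _ :: rest => matchLit rest
  | _ :: rest => matchLit rest

theorem matchLit_length (cs r : List Char) (h : matchLit cs = some r) :
    r.length < cs.length := by
  fun_induction matchLit cs generalizing r with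
  | case1 => simp at h
  | case2 rest => simp only [Option.some.injEq] at h; subst h; simp
  | case3 => simp at h
  | case4 c rest ih => have := ih r h; simp; omega
  | case5 head rest h1 h2 h3 ih => have := ih r h; simp; omega

-- _strip_string_literals: the while-loop over indices becomes recursion on the list
def subLits : List Char → List Char
  | [] => []
  | c :: rest =>
    if c = '"' then
      match h : matchLit rest with
      | some r => subLits r
      | none => c :: subLits rest
    else c :: subLits rest
termination_by cs => cs.length
decreasing_by
  · have := matchLit_length rest r h; simp; omega
  · simp
  · simp

-- the depth-counting for-loop over cleaned
def bDepth : List Char → Int → Option Int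
  | [], d => some d
  | c :: cs, d =>
    if c = '{' then bDepth cs (d + 1)
    else if c = '}' then
      if d - 1 < 0 then none else bDepth cs (d - 1)
    else bDepth cs d

def repair_missing_closing_braces_py_alt (text : String) : Option String :=
  let cleaned := subLits text.toList
  if cleaned.contains '"' then none
  else
    match bDepth cleaned 0 with
    | none => none
    | some d =>
      if d ≤ 0 ∨ 6 < d then none
      else some (text ++ String.mk (List.replicate d.toNat '}'))

-- ===== PRECONDITION & SPEC =====
def Spec_repair_missing_closing_braces_py (text : String) (out : Option String) : Prop := out = repair_missing_closing_braces_py_alt text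
instance (text : String) (out : Option String) : Decidable (Spec_repair_missing_closing_braces_py text out) := by unfold Spec_repair_missing_closing_braces_py; infer_instance

-- ===== CLAIM (what is proved, stated in full; the proofs are below) =====
def Claim_equal_repair_missing_closing_braces_py : Prop := ∀ (text : String), Dom_repair_missing_closing_braces_py text → Spec_repair_missing_closing_braces_py text (repair_missing_closing_braces_py text)

-- ===== LEMMAS AND PROOFS =====

-- inside a string, A's scan is exactly matchLit: it exits where the literal closes
theorem aScan_inString (cs : List Char) (d : Int) :
    aScan cs d true false =
      match matchLit cs with
      | some r => aScan r d false false
      | none => some (d, true) := by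
  fun_induction matchLit cs with
  | case1 => simp [aScan, matchLit]
  | case2 rest => simp [aScan, matchLit]
  | case3 => simp [aScan, matchLit]
  | case4 c rest ih => simpa [aScan, matchLit] using ih
  | case5 head rest h1 h2 h3 ih =>
    have h1' : head ≠ '"' := fun hh => h1 hh
    by_cases hb : head = '\\'
    · subst hb
      have hre : rest = [] := by
        cases rest with
        | nil => rfl
        | cons a t => exact (h3 a t rfl rfl).elim
      subst hre
      simp [aScan, matchLit]
    · simpa [aScan, matchLit, h1', hb] using ih

-- outside strings, A's scan agrees with (strip literals; count depth);
-- an unterminated string leaves a '"' in the cleaned text and ends A with in_string = true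
theorem aScan_outside (cs : List Char) (d : Int) :
    if (subLits cs).contains '"' then
      aScan cs d false false = none ∨ ∃ d', aScan cs d false false = some (d', true)
    else aScan cs d false false = (bDepth (subLits cs) d).map (fun d' => (d', false)) := by
  fun_induction subLits cs generalizing d with
  | case1 => simp [aScan, bDepth, subLits]
  | case2 rest r hm ih =>
    have hstep : aScan ('"' :: rest) d false false = aScan r d false false := by
      have := aScan_inString rest d
      simp [aScan, hm] at this ⊢
      exact this
    rw [hstep]
    exact ih d
  | case3 rest hm ih =>
    have hstep : aScan ('"' :: rest) d false false = some (d, true) := by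
      have := aScan_inString rest d
      simp [aScan, hm] at this ⊢
      exact this
    rw [hstep]
    simp
  | case4 c rest hq ih =>
    have hq' : ¬('"' = c) := fun hh => hq hh.symm
    by_cases hb : c = '{'
    · subst hb
      have := ih (d + 1)
      simpa [aScan, bDepth, List.contains_cons] using this
    · by_cases hc : c = '}'
      · subst hc
        by_cases hd : d - 1 < 0
        · by_cases hmem : '"' ∈ subLits rest
          · simp [aScan, bDepth, hd, hmem]
          · simp [aScan, bDepth, hd, List.contains_cons, hmem]
        · have := ih (d - 1)
          simpa [aScan, bDepth, hd, hq', List.contains_cons] using this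
      · have := ih d
        simpa [aScan, bDepth, hq, hb, hc, hq', List.contains_cons] using this

-- ===== VERDICT (by name: the statement is the Claim_ definition above) =====
theorem repair_missing_closing_braces_py_spec : Claim_equal_repair_missing_closing_braces_py := by
  intro text _
  unfold Spec_repair_missing_closing_braces_py
  unfold repair_missing_closing_braces_py repair_missing_closing_braces_py_alt
  have H := aScan_outside text.toList 0
  by_cases hq : (subLits text.toList).contains '"'
  · rw [if_pos hq] at H
    have hmem : '"' ∈ subLits text.toList := by simpa using hq
    rcases H with h | ⟨d', h⟩ <;> simp [h, hmem]
  · rw [if_neg hq] at H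
    have hmem : '"' ∉ subLits text.toList := by simpa using hq
    cases hb : bDepth (subLits text.toList) 0 with
    | none => simp [hb] at H; simp [H, hmem, hb]
    | some d => simp [hb] at H; simp [H, hmem, hb]
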